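-- pv_equiv track=rewrite | github.com/bahadir-bakla/musicmath | scripts/brute_force_patterns.py | p36_sierpinski_toplami
-- ===== SOURCE A (Python) =====
-- def p36_sierpinski_toplami(n):
--     """Sierpinski toplamı (binomial katsayılar mod 2)
--     Armoni: Fraktal ritim → öz-benzer vuruş kalıpları"""
--     for i in range(n):
--         row_sum = 0
--         for k in range(i + 1):
--             c = 1
--             for j in range(k):
--                 c = c * (i - j) // (j + 1)
--             row_sum += c % 2
--         yield row_sum
-- ===== SOURCE B (Python) =====
-- def p36_sierpinski_toplami(n):
--     """Sierpinski toplamı (binomial katsayılar mod 2)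
--     Closed form: the number of odd entries in Pascal row i is 2**popcount(i)."""
--     for i in range(n):
--         yield 2 ** i.bit_count()
-- ===== Notes on version B (the rewrite author's own statement) =====
-- stated objective: faster
-- what changed: Replaces the triple loop (recomputing each binomial coefficient from scratch and summing its parity) by the closed form 2**popcount(i) for the number of odd entries in Pascal row i (Lucas/Kummer).
import Mathlib
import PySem

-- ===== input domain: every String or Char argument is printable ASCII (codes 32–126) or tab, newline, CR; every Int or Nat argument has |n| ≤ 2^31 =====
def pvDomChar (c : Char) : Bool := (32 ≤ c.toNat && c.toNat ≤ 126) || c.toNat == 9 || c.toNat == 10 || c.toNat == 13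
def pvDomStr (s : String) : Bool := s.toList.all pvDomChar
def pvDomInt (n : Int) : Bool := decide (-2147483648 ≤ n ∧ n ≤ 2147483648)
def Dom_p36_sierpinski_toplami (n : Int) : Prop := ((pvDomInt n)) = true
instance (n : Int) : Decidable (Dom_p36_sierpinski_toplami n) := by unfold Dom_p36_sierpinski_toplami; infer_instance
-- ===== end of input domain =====

-- B replaces A's triple loop by the closed form 2^popcount(i) per row (objective: faster).
-- A is a generator; both ports return the list of the yielded values.

-- ===== PORT A =====
def p36_sierpinski_toplami (n : Int) : List Int :=
  (PySem.List.pyRange 0 n 1).map (fun i =>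
    (PySem.List.pyRange 0 (i + 1) 1).foldl (fun row_sum k =>
      row_sum + PySem.Int.mod
        ((PySem.List.pyRange 0 k 1).foldl
          (fun c j => PySem.Int.floordiv (c * (i - j)) (j + 1)) 1) 2) 0)

-- ===== PORT B =====
def p36_sierpinski_toplami_alt (n : Int) : List Int :=
  (PySem.List.pyRange 0 n 1).map (fun i => (2 : Int) ^ PySem.Int.bitCount i)

-- ===== PRECONDITION & SPEC =====
def Spec_p36_sierpinski_toplami (n : Int) (out : List Int) : Prop := out = p36_sierpinski_toplami_alt n
instance (n : Int) (out : List Int) : Decidable (Spec_p36_sierpinski_toplami n out) := by unfold Spec_p36_sierpinski_toplami; infer_instance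

-- ===== CLAIM (what is proved, stated in full; the proofs are below) =====
def Claim_equal_p36_sierpinski_toplami : Prop := ∀ (n : Int), Dom_p36_sierpinski_toplami n → Spec_p36_sierpinski_toplami n (p36_sierpinski_toplami n)

-- ===== LEMMAS AND PROOFS =====

-- Pair up a sum over an even range.
lemma sum_range_two_mul (f : ℕ → ℕ) (q : ℕ) :
    ∑ k ∈ Finset.range (2*q), f k = ∑ j ∈ Finset.range q, (f (2*j) + f (2*j+1)) := by
  induction q with
  | zero => simp
  | succ q ih =>
    rw [Finset.sum_range_succ, ← ih, Nat.mul_succ, Finset.sum_range_succ, Finset.sum_range_succ]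
    ring_nf

-- Lucas's theorem at p = 2, one digit.
lemma choose_mod_two (m k : ℕ) :
    m.choose k % 2 = ((m % 2).choose (k % 2) * ((m / 2).choose (k / 2))) % 2 :=
  Choose.choose_modEq_choose_mod_mul_choose_div_nat (p := 2)

-- Parity of one even/odd pair of entries of row m, via the halved row.
lemma choose_pair_mod_two (M j : ℕ) :
    M.choose (2*j) % 2 + M.choose (2*j+1) % 2
      = (M/2).choose j % 2 + (M % 2) * ((M/2).choose j % 2) := by
  rw [choose_mod_two M (2*j), choose_mod_two M (2*j+1)]
  have h1 : (2*j) % 2 = 0 := by omega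
  have h2 : (2*j+1) % 2 = 1 := by omega
  have h3 : (2*j) / 2 = j := by omega
  have h4 : (2*j+1) / 2 = j := by omega
  rw [h1, h2, h3, h4]
  rcases Nat.mod_two_eq_zero_or_one M with hb | hb <;> rw [hb] <;> simp [Nat.choose]

-- Number-theoretic core: the number of odd entries in Pascal row m is 2^popcount(m).
lemma sum_choose_mod_two (m : Nat) :
    ∑ k ∈ Finset.range (m + 1), (Nat.choose m k % 2)
      = 2 ^ PySem.Int.bitCount (m : Int) := by
  induction m using Nat.strong_induction_on with
  | _ m ih =>
    rcases Nat.eq_zero_or_pos m with rfl | hpos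
    · simp
    · have hq : m / 2 < m := Nat.div_lt_self hpos (by norm_num)
      have hext : ∑ k ∈ Finset.range (m + 1), (m.choose k % 2)
          = ∑ k ∈ Finset.range (2 * (m / 2 + 1)), (m.choose k % 2) := by
        refine Finset.sum_subset (fun x hx => ?_) ?_
        · simp only [Finset.mem_range] at hx ⊢; omega
        intro k hk hk'
        simp only [Finset.mem_range] at hk hk'
        rw [Nat.choose_eq_zero_of_lt (by omega)]
        rfl
      rw [hext, sum_range_two_mul]
      simp only [choose_pair_mod_two]
      rw [Finset.sum_add_distrib, ← Finset.mul_sum, ih (m/2) hq,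
        PySem.Int.bitCount_natCast hpos]
      rcases Nat.mod_two_eq_zero_or_one m with hb | hb <;> rw [hb] <;> ring

-- A's innermost loop computes the binomial coefficient C(m, k).
lemma inner_loop_eq_choose (m k : Nat) (hk : k ≤ m) :
    (PySem.List.pyRange 0 (k : Int) 1).foldl
      (fun c j => PySem.Int.floordiv (c * ((m : Int) - j)) (j + 1)) 1
      = (Nat.choose m k : Int) := by
  induction k with
  | zero => simp [PySem.List.pyRange_one_eq_nil]
  | succ k ih =>
    have hk' : k ≤ m := Nat.le_of_succ_le hk
    have : ((k + 1 : Nat) : Int) = (k : Int) + 1 := by push_cast; ring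
    rw [this, PySem.List.pyRange_one_succ_right (by positivity), List.foldl_append, ih hk']
    simp only [List.foldl_cons, List.foldl_nil]
    have hsub : (m : Int) - (k : Int) = ((m - k : Nat) : Int) := by omega
    rw [hsub, ← Nat.cast_mul, ← Nat.choose_succ_right_eq,
      show ((k : Int) + 1) = ((k + 1 : Nat) : Int) by push_cast; ring,
      PySem.Int.floordiv_natCast, Nat.mul_div_cancel _ (Nat.succ_pos k)]

-- A's middle loop (the row sum of parities) equals B's closed form.
lemma row_eq_closed_form (m : Nat) :
    (PySem.List.pyRange 0 ((m : Int) + 1) 1).foldl (fun row_sum k =>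
      row_sum + PySem.Int.mod
        ((PySem.List.pyRange 0 k 1).foldl
          (fun c j => PySem.Int.floordiv (c * ((m : Int) - j)) (j + 1)) 1) 2) 0
      = (2 : Int) ^ PySem.Int.bitCount (m : Int) := by
  rw [PySem.List.foldl_add, zero_add, PySem.List.pyRange_one, List.map_map]
  have hlen : (((m : Int) + 1) - 0).toNat = m + 1 := by omega
  rw [hlen]
  have hmap : (List.range (m + 1)).map
      ((fun k => PySem.Int.mod
        ((PySem.List.pyRange 0 k 1).foldl
          (fun c j => PySem.Int.floordiv (c * ((m : Int) - j)) (j + 1)) 1) 2) ∘ (fun k : ℕ => (0 : Int) + ↑k))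
      = (List.range (m + 1)).map (fun k : ℕ => ((Nat.choose m k % 2 : ℕ) : Int)) := by
    refine List.map_congr_left (fun k hk => ?_)
    have hkm : k ≤ m := by simpa [Nat.lt_succ_iff] using List.mem_range.mp hk
    simp only [Function.comp, zero_add]
    rw [inner_loop_eq_choose m k hkm,
      show (2 : Int) = ((2 : ℕ) : Int) by norm_num, PySem.Int.mod_natCast]
  rw [hmap]
  have hsum : ((List.range (m + 1)).map (fun k : ℕ => ((Nat.choose m k % 2 : ℕ) : Int))).sum
      = ((∑ k ∈ Finset.range (m + 1), (Nat.choose m k % 2) : ℕ) : Int) := by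
    rw [Nat.cast_sum]
    rfl
  rw [hsum, sum_choose_mod_two]
  push_cast
  ring

-- ===== VERDICT (by name: the statement is the Claim_ definition above) =====
theorem p36_sierpinski_toplami_spec : Claim_equal_p36_sierpinski_toplami := by
  intro n _
  unfold Spec_p36_sierpinski_toplami p36_sierpinski_toplami p36_sierpinski_toplami_alt
  refine List.map_congr_left (fun i hi => ?_)
  have h0 : 0 ≤ i := (PySem.List.mem_pyRange_one.mp hi).1
  obtain ⟨m, rfl⟩ : ∃ m : Nat, i = (m : Int) := ⟨i.toNat, (Int.toNat_of_nonneg h0).symm⟩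
  exact row_eq_closed_form m
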